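-- pv_equiv track=rewrite | github.com/spark-c/meeting-scheduler | inputValidation.py | has_num_and_char
-- ===== SOURCE A (Python) =====
-- def has_num_and_char(givenPass):
--     numNum = 0
--     numChar = 0
--     for char in givenPass:
--         if numNum == 0 or numChar == 0:
--             try:
--                 int(char)
--                 numNum += 1
--             except:
--                 numChar += 1
--         else:
--             return True
--     if numNum == 0 or numChar == 0:
--         return False
--     else:
--         return True
-- ===== SOURCE B (Python) =====
-- def is_digit(c):
--     try:
--         int(c)
--         return True
--     except:
--         return False
--
-- def has_num_and_char(givenPass):
--     n = sum(1 for c in givenPass if is_digit(c))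
--     return 0 < n < len(givenPass)
-- ===== Notes on version B (the rewrite author's own statement) =====
-- stated objective: simpler
-- what changed: Replaces A's two-counter early-exit loop with a single digit count n (digit test = int(c) succeeds) and the closed predicate 0 < n < len(givenPass).
import Mathlib
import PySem

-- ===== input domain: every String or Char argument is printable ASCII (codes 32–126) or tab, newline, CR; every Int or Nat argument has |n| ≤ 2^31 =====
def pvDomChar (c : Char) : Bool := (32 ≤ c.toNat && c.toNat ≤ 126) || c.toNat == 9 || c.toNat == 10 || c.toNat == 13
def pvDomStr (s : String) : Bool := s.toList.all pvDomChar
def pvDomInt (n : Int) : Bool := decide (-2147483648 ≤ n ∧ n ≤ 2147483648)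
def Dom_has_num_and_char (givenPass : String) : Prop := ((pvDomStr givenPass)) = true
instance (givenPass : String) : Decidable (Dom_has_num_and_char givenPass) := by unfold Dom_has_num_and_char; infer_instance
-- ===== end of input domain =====

-- B replaces A's two-counter early-exit loop by counting digits once and testing 0 < n < len (simpler decomposition).


-- ===== PORT A =====
-- int(char) succeeding inside try/except: exact via PySem.Int.ofStr? on the one-char string
def pvIntOk (c : Char) : Bool := (PySem.Int.ofStr? (String.ofList [c])).isSome

def hasLoopA : List Char → Nat → Nat → Bool
  | [], numNum, numChar => !(numNum == 0 || numChar == 0)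
  | c :: rest, numNum, numChar =>
    if numNum == 0 || numChar == 0 then
      if pvIntOk c then hasLoopA rest (numNum + 1) numChar
      else hasLoopA rest numNum (numChar + 1)
    else true

def has_num_and_char (givenPass : String) : Bool := hasLoopA givenPass.toList 0 0

-- ===== PORT B =====
def has_num_and_char_alt (givenPass : String) : Bool :=
  let n := (givenPass.toList.filter pvIntOk).length
  decide (0 < n ∧ n < givenPass.toList.length)

-- ===== PRECONDITION & SPEC =====
def Spec_has_num_and_char (givenPass : String) (out : Bool) : Prop := out = has_num_and_char_alt givenPass
instance (givenPass : String) (out : Bool) : Decidable (Spec_has_num_and_char givenPass out) := by unfold Spec_has_num_and_char; infer_instance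

-- ===== CLAIM (what is proved, stated in full; the proofs are below) =====
def Claim_equal_has_num_and_char : Prop := ∀ (givenPass : String), Dom_has_num_and_char givenPass → Spec_has_num_and_char givenPass (has_num_and_char givenPass)

-- ===== LEMMAS AND PROOFS =====
theorem hasLoopA_eq (l : List Char) : ∀ (nn nc : Nat),
    hasLoopA l nn nc =
      decide (0 < nn + (l.filter pvIntOk).length ∧
              0 < nc + (l.filter (fun c => !pvIntOk c)).length) := by
  induction l with
  | nil => intro nn nc; cases nn <;> cases nc <;> simp [hasLoopA]
  | cons c rest ih =>
    intro nn nc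
    simp only [hasLoopA]
    by_cases hz : (nn == 0 || nc == 0) = true
    · rw [if_pos hz]
      by_cases h : pvIntOk c = true
      · rw [if_pos h, ih, List.filter_cons_of_pos h,
          List.filter_cons_of_neg (p := fun c => !pvIntOk c) (by simp [h])]
        simp only [List.length_cons]
        rw [decide_eq_decide]; omega
      · rw [if_neg h, ih, List.filter_cons_of_neg (by simpa using h),
          List.filter_cons_of_pos (p := fun c => !pvIntOk c) (by simp [h])]
        simp only [List.length_cons]
        rw [decide_eq_decide]; omega
    · rw [if_neg hz]
      simp only [beq_iff_eq, Bool.or_eq_true, not_or] at hz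
      rw [eq_comm, decide_eq_true_iff]
      constructor <;> omega
  
theorem filter_len_sum (l : List Char) :
    (l.filter pvIntOk).length + (l.filter (fun c => !pvIntOk c)).length = l.length := by
  induction l with
  | nil => rfl
  | cons c rest ih =>
    by_cases h : pvIntOk c = true <;> simp [List.filter, h] <;> omega

-- ===== VERDICT (by name: the statement is the Claim_ definition above) =====
theorem has_num_and_char_spec : Claim_equal_has_num_and_char := by
  intro s _
  unfold Spec_has_num_and_char has_num_and_char
  have hsum := filter_len_sum s.toList
  rw [hasLoopA_eq]
  simp only [has_num_and_char_alt]
  rw [decide_eq_decide]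
  omega
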